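-- pv_equiv track=rewrite | github.com/LimitBreaker98/algorithms_ds | topics/DP/AtCoderDP/py/vacation.py | maxHappiness
-- ===== SOURCE A (Python) =====
-- from typing import List
--
-- def maxHappiness(matrix: List[List[int]], n: int) -> int:
--     maxVal = [[0 for _ in range(3)] for _ in range(n)]
--     for c in range(3): #base cases
--         maxVal[0][c] = matrix[0][c]
--
--     for r in range(1, n):
--         maxVal[r][0] = matrix[r][0] + max(maxVal[r-1][1], maxVal[r-1][2])
--         maxVal[r][1] = matrix[r][1] + max(maxVal[r-1][0], maxVal[r-1][2])
--         maxVal[r][2] = matrix[r][2] + max(maxVal[r-1][0], maxVal[r-1][1])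
--
--     return max(maxVal[n-1][0], maxVal[n-1][1], maxVal[n-1][2])
-- ===== SOURCE B (Python) =====
-- def maxHappiness(matrix, n):
--     memo = {}
--
--     def best(r, c):
--         if (r, c) in memo:
--             return memo[(r, c)]
--         if r == 0:
--             v = matrix[0][c]
--         else:
--             v = matrix[r][c] + max(best(r - 1, o) for o in (0, 1, 2) if o != c)
--         memo[(r, c)] = v
--         return v
--
--     return max(best(n - 1, c) for c in range(3))
-- ===== Notes on version B (the rewrite author's own statement) =====
-- stated objective: alternative
-- what changed: Replaces the bottom-up n x 3 DP table fill with a top-down memoized recursion best(r, c) over the same recurrence, answering max(best(n-1, c)) without allocating or filling a table.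
import Mathlib
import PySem

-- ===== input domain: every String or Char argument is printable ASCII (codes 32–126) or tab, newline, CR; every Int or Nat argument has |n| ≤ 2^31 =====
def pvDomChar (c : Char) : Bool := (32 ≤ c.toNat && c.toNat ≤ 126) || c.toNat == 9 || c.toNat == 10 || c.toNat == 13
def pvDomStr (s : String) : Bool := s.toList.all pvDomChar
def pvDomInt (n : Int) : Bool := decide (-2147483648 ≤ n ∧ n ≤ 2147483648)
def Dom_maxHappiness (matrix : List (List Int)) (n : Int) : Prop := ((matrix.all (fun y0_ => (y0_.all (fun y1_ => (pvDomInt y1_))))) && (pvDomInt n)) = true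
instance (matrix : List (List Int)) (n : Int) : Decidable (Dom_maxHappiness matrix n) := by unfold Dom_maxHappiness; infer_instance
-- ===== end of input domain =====

-- B replaces A's bottom-up n×3 DP table with a top-down recursion best(r, c) over the same recurrence (alternative decomposition; equal return value proved on Pre_; Source B's memo dict is an evaluation cache, ported as the plain recursion it caches).


-- ===== PORT A =====
-- matrix[r][c] / maxVal[r][c] with a default; in range on every input admitted by Pre_.
def pvG (m : List (List Int)) (r c : Int) : Int := PySem.List.pyGetD (PySem.List.pyGetD m r []) c 0

-- A's inner loop body: Python writes maxVal[r][0], maxVal[r][1], maxVal[r][2] in turn, each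
-- reading only row r-1 (which those writes never touch), so writing row r as one list is exact.
def pvStepA (matrix : List (List Int)) (mv : List (List Int)) (r : Int) : List (List Int) :=
  PySem.List.pySetD mv r
    [ pvG matrix r 0 + max (pvG mv (r-1) 1) (pvG mv (r-1) 2),
      pvG matrix r 1 + max (pvG mv (r-1) 0) (pvG mv (r-1) 2),
      pvG matrix r 2 + max (pvG mv (r-1) 0) (pvG mv (r-1) 1) ]

def maxHappiness (matrix : List (List Int)) (n : Int) : Int :=
  let mv0 : List (List Int) := (PySem.List.pyRange 0 n 1).map (fun _ => [0, 0, 0])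
  -- base cases: for c in range(3): maxVal[0][c] = matrix[0][c]  (row 0 written element by element)
  let mv1 := PySem.List.pySetD mv0 0 [pvG matrix 0 0, pvG matrix 0 1, pvG matrix 0 2]
  let mv := (PySem.List.pyRange 1 n 1).foldl (pvStepA matrix) mv1
  max (pvG mv (n-1) 0) (max (pvG mv (n-1) 1) (pvG mv (n-1) 2))

-- ===== PORT B =====
-- Source B's best(r, c): for r ≥ 1, the two activities other than c are
-- (if c = 0 then 1 else 0) and (if c = 2 then 1 else 2) — the generator `o != c` over (0,1,2).
def pvBest (matrix : List (List Int)) : Nat → Int → Int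
  | 0, c => pvG matrix 0 c
  | (r+1), c =>
      pvG matrix ((r : Int) + 1) c +
        max (pvBest matrix r (if c = 0 then 1 else 0))
            (pvBest matrix r (if c = 2 then 1 else 2))

def maxHappiness_alt (matrix : List (List Int)) (n : Int) : Int :=
  if n ≤ 0 then 0  -- Source B's recursion never reaches its base case here (RecursionError); unreachable under Pre_
  else
    let r := (n - 1).toNat
    max (pvBest matrix r 0) (max (pvBest matrix r 1) (pvBest matrix r 2))

-- ===== PRECONDITION & SPEC =====
-- Pre_ excludes exactly the inputs where A raises IndexError: n < 1 (empty table indexed),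
-- n > len(matrix), or one of the first n rows having fewer than 3 columns.
def Pre_maxHappiness (matrix : List (List Int)) (n : Int) : Prop :=
  1 ≤ n ∧ n ≤ matrix.length ∧ ∀ row ∈ matrix.take n.toNat, 3 ≤ row.length
instance (matrix : List (List Int)) (n : Int) : Decidable (Pre_maxHappiness matrix n) := by
  unfold Pre_maxHappiness; infer_instance

def pvWitness_maxHappiness : List (List Int) × Int := ([[1, 2, 3], [4, 1, 1]], 2)

def Spec_maxHappiness (matrix : List (List Int)) (n : Int) (out : Int) : Prop := out = maxHappiness_alt matrix n
instance (matrix : List (List Int)) (n : Int) (out : Int) : Decidable (Spec_maxHappiness matrix n out) := by unfold Spec_maxHappiness; infer_instance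

-- ===== CLAIM (what is proved, stated in full; the proofs are below) =====
def Claim_equal_maxHappiness : Prop := ∀ (matrix : List (List Int)) (n : Int), Dom_maxHappiness matrix n → Pre_maxHappiness matrix n → Spec_maxHappiness matrix n (maxHappiness matrix n)

-- ===== LEMMAS AND PROOFS =====

-- A's table after the loop iterations r = 1 .. j.
def pvTbl (matrix mv1 : List (List Int)) (j : Nat) : List (List Int) :=
  (PySem.List.pyRange 1 (1 + (j : Int)) 1).foldl (pvStepA matrix) mv1

-- A's table after the base-case writes (row 0 := matrix[0]).
def pvInit (matrix : List (List Int)) (m : Nat) : List (List Int) :=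
  PySem.List.pySetD ((PySem.List.pyRange 0 ((m : Int) + 1) 1).map (fun _ => ([0,0,0] : List Int))) 0
    [pvG matrix 0 0, pvG matrix 0 1, pvG matrix 0 2]

-- Invariant: A's table keeps length m+1 and its row j holds B's best(j, ·).
theorem pvInv (matrix : List (List Int)) (m : Nat) (j : Nat) (hj : j ≤ m) :
    (pvTbl matrix (pvInit matrix m) j).length = m + 1 ∧
    (pvTbl matrix (pvInit matrix m) j).getD j [] =
      [pvBest matrix j 0, pvBest matrix j 1, pvBest matrix j 2] := by
  induction j with
  | zero =>
    constructor
    · simp [pvTbl, pvInit, PySem.List.length_pySetD, PySem.List.length_pyRange_one]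
    · have hlen0 : 0 < ((PySem.List.pyRange 0 ((m : Int) + 1) 1).map (fun _ => ([0,0,0] : List Int))).length := by
        simp [PySem.List.length_pyRange_one]
      simp [pvTbl, pvInit, pvBest, PySem.List.pySetD_of_nonneg, List.getD]
  | succ j ih =>
    obtain ⟨hlen, hrow⟩ := ih (by omega)
    have hstep : pvTbl matrix (pvInit matrix m) (j+1)
        = pvStepA matrix (pvTbl matrix (pvInit matrix m) j) (1 + (j : Int)) := by
      unfold pvTbl
      have : (1 : Int) + ((j+1 : Nat) : Int) = (1 + (j : Int)) + 1 := by push_cast; omega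
      rw [this, PySem.List.pyRange_one_succ_right (by omega), List.foldl_append]
      simp
    set T := pvTbl matrix (pvInit matrix m) j with hT
    have hjT : j + 1 < T.length := by omega
    have hgT : ∀ c : Int, pvG T ((1 + (j:Int)) - 1) c
        = PySem.List.pyGetD ([pvBest matrix j 0, pvBest matrix j 1, pvBest matrix j 2]) c 0 := by
      intro c
      have : (1 + (j:Int)) - 1 = ((j : Nat) : Int) := by omega
      rw [pvG, this, PySem.List.pyGetD_natCast, hrow]
    have hset : pvStepA matrix T (1 + (j : Int)) =
        T.set (j+1) [ pvG matrix (1 + (j:Int)) 0 + max (pvG T ((1 + (j:Int)) - 1) 1) (pvG T ((1 + (j:Int)) - 1) 2),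
          pvG matrix (1 + (j:Int)) 1 + max (pvG T ((1 + (j:Int)) - 1) 0) (pvG T ((1 + (j:Int)) - 1) 2),
          pvG matrix (1 + (j:Int)) 2 + max (pvG T ((1 + (j:Int)) - 1) 0) (pvG T ((1 + (j:Int)) - 1) 1) ] := by
      rw [pvStepA]
      have h1 : (1 : Int) + (j:Int) = ((j+1 : Nat) : Int) := by push_cast; omega
      rw [h1, PySem.List.pySetD_natCast]
    constructor
    · rw [hstep, hset]; simpa using hlen
    · rw [hstep, hset, List.getD, List.getElem?_set_self hjT]
      simp only [hgT, Option.getD_some, pvBest]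
      have h1 : (1 : Int) + (j:Int) = ((j : Int)) + 1 := by ring
      rw [h1]
      simp [PySem.List.pyGetD]

theorem maxHappiness_spec : Claim_equal_maxHappiness := by
  intro matrix n _hdom hpre
  obtain ⟨h1, h2, _h3⟩ := hpre
  obtain ⟨N, rfl⟩ : ∃ N : Nat, n = (N : Int) := ⟨n.toNat, (Int.toNat_of_nonneg (by omega)).symm⟩
  obtain ⟨m, rfl⟩ : ∃ m : Nat, N = m + 1 := ⟨N - 1, by omega⟩
  obtain ⟨hlen, hrow⟩ := pvInv matrix m m le_rfl
  show maxHappiness _ _ = _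
  rw [maxHappiness, maxHappiness_alt]
  have hnpos : ¬ (((m+1 : Nat) : Int) ≤ 0) := by push_cast; omega
  rw [if_neg hnpos]
  simp only []
  have hcast1 : ((m+1 : Nat) : Int) = (m : Int) + 1 := by simp
  have hrange1 : PySem.List.pyRange 1 ((m:Int) + 1) 1 = PySem.List.pyRange 1 (1 + (m:Int)) 1 := by
    ring_nf
  have hsub : ((m:Int) + 1) - 1 = ((m : Nat) : Int) := by simp
  rw [hcast1, hrange1, hsub]
  have hTbl : (PySem.List.pyRange 1 (1 + (m:Int)) 1).foldl (pvStepA matrix) (pvInit matrix m)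
      = pvTbl matrix (pvInit matrix m) m := rfl
  rw [show (PySem.List.pySetD ((PySem.List.pyRange 0 ((m:Int)+1) 1).map (fun _ => ([0,0,0] : List Int))) 0
        [pvG matrix 0 0, pvG matrix 0 1, pvG matrix 0 2]) = pvInit matrix m from rfl,
     hTbl]
  have hG : ∀ c : Int, pvG (pvTbl matrix (pvInit matrix m) m) ((m:Nat):Int) c
      = PySem.List.pyGetD ([pvBest matrix m 0, pvBest matrix m 1, pvBest matrix m 2]) c 0 := by
    intro c
    rw [pvG, PySem.List.pyGetD_natCast, hrow]
  rw [hG, hG, hG]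
  have htn : (((m : Nat) : Int)).toNat = m := by simp
  rw [htn]
  simp [PySem.List.pyGetD]
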